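-- pv_equiv track=rewrite | github.com/hummel22/homeassistant_gitops | homeassistant_gitops/rootfs/app/gitops_bridge/groups.py | _normalize_members
-- ===== SOURCE A (Python) =====
-- from typing import Any
--
-- class GroupsError(Exception):
--     def __init__(self, message: str, status_code: int = 400) -> None:
--         super().__init__(message)
--         self.message = message
--         self.status_code = status_code
--
--     def __str__(self) -> str:
--         return self.message
--
-- def _normalize_members(value: Any) -> list[str]:
--     if value is None:
--         return []
--     if not isinstance(value, list):
--         raise GroupsError("members must be a list of entity IDs.")
--     cleaned = sorted(
--         {member.strip().lower() for member in value if isinstance(member, str) and member.strip()}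
--     )
--     return cleaned
-- ===== SOURCE B (Python) =====
-- class GroupsError(Exception):
--     def __init__(self, message, status_code=400):
--         super().__init__(message)
--         self.message = message
--         self.status_code = status_code
--
--     def __str__(self):
--         return self.message
--
--
-- def _normalize_members(value):
--     if value is None:
--         return []
--     if not isinstance(value, list):
--         raise GroupsError("members must be a list of entity IDs.")
--     result = []
--     for member in value:
--         if not isinstance(member, str):
--             continue
--         s = member.strip().lower()
--         if not s:
--             continue
--         i = 0
--         while i < len(result) and result[i] < s:
--             i += 1
--         if i == len(result) or result[i] != s:
--             result.insert(i, s)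
--     return result
-- ===== Notes on version B (the rewrite author's own statement) =====
-- stated objective: alternative
-- what changed: B abandons A's set-comprehension-then-sort entirely: it maintains a sorted duplicate-free result list incrementally, making one pass over the input and inserting each cleaned string at its ordered position (skipping it if already present), so no set and no final sort exist.
import Mathlib
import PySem

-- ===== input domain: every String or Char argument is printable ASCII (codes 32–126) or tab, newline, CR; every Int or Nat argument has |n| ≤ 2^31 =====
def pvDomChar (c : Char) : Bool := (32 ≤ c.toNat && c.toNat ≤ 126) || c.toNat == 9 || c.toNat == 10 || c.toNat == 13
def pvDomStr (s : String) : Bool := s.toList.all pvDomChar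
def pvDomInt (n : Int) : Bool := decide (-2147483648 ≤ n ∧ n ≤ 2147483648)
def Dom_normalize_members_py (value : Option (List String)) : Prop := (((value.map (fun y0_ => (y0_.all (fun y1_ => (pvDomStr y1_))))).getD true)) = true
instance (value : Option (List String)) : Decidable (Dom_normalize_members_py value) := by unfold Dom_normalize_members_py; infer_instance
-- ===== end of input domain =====

-- B replaces A's build-a-set-then-sort with an incremental ordered insertion: one pass over the
-- input, each cleaned string inserted at its sorted position unless already present (no set, no sort).
-- Under the typed domain the Python isinstance guards are always satisfied, so both are total.

-- ===== PORT A =====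
-- A: sorted({member.strip().lower() for member in value if isinstance(member, str) and member.strip()})
-- (the set comprehension = PySem.Set.ofList of the cleaned strings in iteration order;
--  sorted with no key = identity key; isinstance(member, str) is always true here)
def normalize_members_py (value : Option (List String)) : List String :=
  match value with
  | none => []
  | some xs =>
      PySem.List.sorted
        (PySem.Set.ofList
          ((xs.filter (fun m => PySem.Str.strip m ≠ "")).map
            (fun m => PySem.Str.lower (PySem.Str.strip m))))
        (fun x => x) false

-- ===== PORT B =====
-- B's inner while/insert: walk past the elements smaller than s; if the stop position holds s,
-- keep the list unchanged, otherwise insert s right there (exactly Python's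
-- 'while i < len(result) and result[i] < s: i += 1; if i == len(result) or result[i] != s: result.insert(i, s)')
def insSorted (s : String) : List String → List String
  | [] => [s]
  | x :: rest =>
      if x < s then x :: insSorted s rest
      else if x = s then x :: rest
      else s :: x :: rest

-- the body of B's for-loop: clean one member, skip it if empty, else insert in order
def insStep (result : List String) (m : String) : List String :=
  let s := PySem.Str.lower (PySem.Str.strip m)
  if s = "" then result else insSorted s result

-- B: result = []; for member in value: s = member.strip().lower(); if s: insert-in-order
def normalize_members_py_alt (value : Option (List String)) : List String :=
  match value with
  | none => []
  | some xs => xs.foldl insStep []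

-- ===== PRECONDITION & SPEC =====
def Spec_normalize_members_py (value : Option (List String)) (out : List String) : Prop := out = normalize_members_py_alt value
instance (value : Option (List String)) (out : List String) : Decidable (Spec_normalize_members_py value out) := by unfold Spec_normalize_members_py; infer_instance

-- ===== CLAIM (what is proved, stated in full; the proofs are below) =====
def Claim_equal_normalize_members_py : Prop := ∀ (value : Option (List String)), Dom_normalize_members_py value → Spec_normalize_members_py value (normalize_members_py value)

-- ===== LEMMAS AND PROOFS =====

-- lowering (ASCII char map) preserves emptiness, so B's 'if not s' guard after lower
-- tests exactly A's 'member.strip()' truthiness before lower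
theorem lower_eq_empty_iff (s : String) : PySem.Str.lower s = "" ↔ s = "" := by
  constructor <;> intro h
  · have := congrArg String.toList h
    simp [PySem.Chars.lower] at this
    exact this
  · subst h; rfl

theorem mem_insSorted (s y : String) (l : List String) :
    y ∈ insSorted s l ↔ y = s ∨ y ∈ l := by
  induction l with
  | nil => simp [insSorted]
  | cons x rest ih =>
      by_cases h1 : x < s
      · simp only [insSorted, if_pos h1, List.mem_cons, ih]; tauto
      · by_cases h2 : x = s
        · subst h2
          rw [insSorted, if_neg h1, if_pos rfl]
          simp only [List.mem_cons]
          tauto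
        · simp only [insSorted, if_neg h1, if_neg h2, List.mem_cons]

theorem pairwise_insSorted (s : String) (l : List String) (h : l.Pairwise (· < ·)) :
    (insSorted s l).Pairwise (· < ·) := by
  induction l with
  | nil => simp [insSorted]
  | cons x rest ih =>
      obtain ⟨hx, hrest⟩ := List.pairwise_cons.mp h
      by_cases h1 : x < s
      · rw [insSorted, if_pos h1]
        refine List.pairwise_cons.mpr ⟨?_, ih hrest⟩
        intro y hy
        rcases (mem_insSorted s y rest).mp hy with rfl | hy'
        · exact h1
        · exact hx y hy'
      · by_cases h2 : x = s
        · rw [insSorted, if_neg h1, if_pos h2]; exact h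
        · rw [insSorted, if_neg h1, if_neg h2]
          refine List.pairwise_cons.mpr ⟨?_, h⟩
          intro y hy
          have hsx : s < x := lt_of_le_of_ne (not_lt.mp h1) (fun e => h2 e.symm)
          rcases List.mem_cons.mp hy with rfl | hy'
          · exact hsx
          · exact lt_trans hsx (hx y hy')

-- invariant of B's fold: the accumulator stays strictly sorted and holds exactly the
-- cleaned strings of the processed prefix (plus whatever it held before)
theorem foldl_ins_inv (xs : List String) :
    ∀ (res : List String), res.Pairwise (· < ·) →
      (xs.foldl insStep res).Pairwise (· < ·)
      ∧ (∀ y, y ∈ xs.foldl insStep res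
          ↔ y ∈ res ∨ ∃ m ∈ xs, PySem.Str.strip m ≠ "" ∧ y = PySem.Str.lower (PySem.Str.strip m)) := by
  induction xs with
  | nil => intro res h; exact ⟨h, fun y => by simp⟩
  | cons m rest ih =>
      intro res h
      rw [List.foldl_cons]
      by_cases hs : PySem.Str.lower (PySem.Str.strip m) = ""
      · have hred : insStep res m = res := by unfold insStep; rw [if_pos hs]
        rw [hred]
        obtain ⟨hp, hm⟩ := ih res h
        refine ⟨hp, fun y => ?_⟩
        rw [hm y]
        constructor
        · rintro (hy | ⟨m', hm', hne, rfl⟩)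
          · exact Or.inl hy
          · exact Or.inr ⟨m', List.mem_cons_of_mem _ hm', hne, rfl⟩
        · rintro (hy | ⟨m', hm', hne, rfl⟩)
          · exact Or.inl hy
          · rcases List.mem_cons.mp hm' with rfl | hm''
            · exact absurd ((lower_eq_empty_iff _).mp hs) hne
            · exact Or.inr ⟨m', hm'', hne, rfl⟩
      · have hred : insStep res m = insSorted (PySem.Str.lower (PySem.Str.strip m)) res := by
          unfold insStep; rw [if_neg hs]
        rw [hred]
        obtain ⟨hp, hm⟩ := ih (insSorted (PySem.Str.lower (PySem.Str.strip m)) res)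
          (pairwise_insSorted _ _ h)
        refine ⟨hp, fun y => ?_⟩
        rw [hm y, mem_insSorted]
        have hne : PySem.Str.strip m ≠ "" := fun e => hs (by rw [e]; rfl)
        constructor
        · rintro ((rfl | hy) | ⟨m', hm', hne', rfl⟩)
          · exact Or.inr ⟨m, List.mem_cons_self, hne, rfl⟩
          · exact Or.inl hy
          · exact Or.inr ⟨m', List.mem_cons_of_mem _ hm', hne', rfl⟩
        · rintro (hy | ⟨m', hm', hne', rfl⟩)
          · exact Or.inl (Or.inr hy)
          · rcases List.mem_cons.mp hm' with rfl | hm''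
            · exact Or.inl (Or.inl rfl)
            · exact Or.inr ⟨m', hm'', hne', rfl⟩

theorem normalize_members_py_spec : Claim_equal_normalize_members_py := by
  intro value _
  unfold Spec_normalize_members_py normalize_members_py normalize_members_py_alt
  cases value with
  | none => rfl
  | some xs =>
      show PySem.List.sorted
          (PySem.Set.ofList
            ((xs.filter (fun m => PySem.Str.strip m ≠ "")).map
              (fun m => PySem.Str.lower (PySem.Str.strip m))))
          (fun x => x) false
        = xs.foldl insStep []
      obtain ⟨hpw, hmem⟩ := foldl_ins_inv xs [] (by simp)
      have hperm : (xs.foldl insStep []).Perm (PySem.Set.ofList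
          ((xs.filter (fun m => PySem.Str.strip m ≠ "")).map
            (fun m => PySem.Str.lower (PySem.Str.strip m)))) := by
        refine (List.perm_ext_iff_of_nodup (hpw.imp ne_of_lt) (PySem.Set.nodup_ofList _)).mpr ?_
        intro y
        rw [hmem y, PySem.Set.mem_ofList]
        simp only [List.mem_map, List.mem_filter, List.not_mem_nil, false_or, decide_eq_true_eq]
        constructor
        · rintro ⟨a, ha, hne, rfl⟩
          exact ⟨a, ⟨ha, hne⟩, rfl⟩
        · rintro ⟨a, ⟨ha, hne⟩, rfl⟩
          exact ⟨a, ha, hne, rfl⟩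
      exact PySem.List.sorted_eq_of_perm_of_pairwise_lt _ _ _ hperm hpw
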